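-- pv_equiv track=rewrite | github.com/jmegner/CheckioPuzzles | mind-switcher.py | getBodyToMind
-- ===== SOURCE A (Python) =====
-- def getBodyToMind(journal):
--     bodyToMind = {}
--
--     for body1, body2 in journal:
--         if body1 not in bodyToMind:
--             bodyToMind[body1] = body1
--         if body2 not in bodyToMind:
--             bodyToMind[body2] = body2
--
--         bodyToMind[body1], bodyToMind[body2] = (
--             bodyToMind[body2], bodyToMind[body1])
--
--     return bodyToMind
-- ===== SOURCE B (Python) =====
-- def getBodyToMind(journal):
--     def mindIn(body):
--         # trace backwards: which label did the mind now in `body` start under?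
--         cur = body
--         for b1, b2 in reversed(journal):
--             if cur == b1:
--                 cur = b2
--             elif cur == b2:
--                 cur = b1
--         return cur
--
--     bodies = []
--     for b1, b2 in journal:
--         if b1 not in bodies:
--             bodies.append(b1)
--         if b2 not in bodies:
--             bodies.append(b2)
--     return {body: mindIn(body) for body in bodies}
-- ===== Notes on version B (the rewrite author's own statement) =====
-- stated objective: alternative
-- what changed: Instead of A's forward simulation that mutates a dict with guarded identity-inserts and pairwise value swaps, B computes each body's final mind independently by tracing the swap journal backwards from that body, then builds the result as a comprehension over the first-appearance body order; it trades a constant-size state update per event for a per-key functional trace.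
import Mathlib
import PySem

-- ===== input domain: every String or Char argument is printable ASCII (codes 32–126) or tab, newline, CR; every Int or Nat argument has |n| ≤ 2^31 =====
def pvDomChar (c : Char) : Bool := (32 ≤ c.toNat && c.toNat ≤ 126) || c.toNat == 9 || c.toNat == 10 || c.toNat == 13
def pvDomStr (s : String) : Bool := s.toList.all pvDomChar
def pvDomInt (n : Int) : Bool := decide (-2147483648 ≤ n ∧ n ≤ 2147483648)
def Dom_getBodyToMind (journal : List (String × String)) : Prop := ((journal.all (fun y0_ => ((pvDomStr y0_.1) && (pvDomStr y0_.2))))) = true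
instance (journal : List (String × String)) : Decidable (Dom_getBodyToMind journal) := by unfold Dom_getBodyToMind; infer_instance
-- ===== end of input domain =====

-- B replaces A's forward dict simulation (guarded inserts + pairwise swaps) by an
-- independent backward trace of the journal per distinct body (objective: alternative).

-- ===== PORT A =====
-- one iteration of A's loop: guarded identity inserts, then the tuple-swap
-- (Python evaluates the RHS tuple first, then assigns body1, then body2;
--  getD's default is never used: both keys are present at the lookups)
def stepA (d : PySem.Dict String String) (p : String × String) : PySem.Dict String String :=
  let d1 := if d.contains p.1 then d else d.insert p.1 p.1
  let d2 := if d1.contains p.2 then d1 else d1.insert p.2 p.2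
  let v1 := d2.getD p.1 ""
  let v2 := d2.getD p.2 ""
  (d2.insert p.1 v2).insert p.2 v1

def getBodyToMind (journal : List (String × String)) : List (String × String) :=
  (journal.foldl stepA PySem.Dict.empty).items

-- ===== PORT B =====
-- one step of B's backward trace: the effect (read backwards) of one swap on a body label
def swapBack (cur : String) (p : String × String) : String :=
  if cur = p.1 then p.2 else if cur = p.2 then p.1 else cur

-- mindIn(body): fold swapBack over reversed(journal)
def mindIn (journal : List (String × String)) (body : String) : String :=
  journal.reverse.foldl swapBack body

-- `if b not in bodies: bodies.append(b)`
def addNew (ks : List String) (b : String) : List String :=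
  if b ∈ ks then ks else ks ++ [b]

-- the `bodies` collection loop of Source B
def collectBodies (journal : List (String × String)) : List String :=
  journal.foldl (fun ks p => addNew (addNew ks p.1) p.2) []

def getBodyToMind_alt (journal : List (String × String)) : List (String × String) :=
  (collectBodies journal).map (fun b => (b, mindIn journal b))

-- ===== PRECONDITION & SPEC =====
def Spec_getBodyToMind (journal : List (String × String)) (out : List (String × String)) : Prop := out = getBodyToMind_alt journal
instance (journal : List (String × String)) (out : List (String × String)) : Decidable (Spec_getBodyToMind journal out) := by unfold Spec_getBodyToMind; infer_instance

-- ===== CLAIM (what is proved, stated in full; the proofs are below) =====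
def Claim_equal_getBodyToMind : Prop := ∀ (journal : List (String × String)), Dom_getBodyToMind journal → Spec_getBodyToMind journal (getBodyToMind journal)

-- ===== LEMMAS AND PROOFS =====

theorem mem_addNew_of_mem (ks : List String) (b x : String) (h : x ∈ ks) : x ∈ addNew ks b := by
  unfold addNew; split
  · exact h
  · exact List.mem_append_left _ h

theorem mem_addNew_self (ks : List String) (b : String) : b ∈ addNew ks b := by
  unfold addNew; split
  · assumption
  · simp

theorem nodup_addNew (ks : List String) (b : String) (h : ks.Nodup) : (addNew ks b).Nodup := by
  by_cases hb : b ∈ ks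
  · simp [addNew, hb, h]
  · simp [addNew, hb, List.nodup_append, h]
    exact fun a ha e => hb (e ▸ ha)

-- collectBodies as a fold from an arbitrary start keeps old members
theorem mem_collectFrom_of_mem (l : List (String × String)) (ks : List String) (x : String)
    (h : x ∈ ks) : x ∈ l.foldl (fun ks p => addNew (addNew ks p.1) p.2) ks := by
  induction l generalizing ks with
  | nil => exact h
  | cons q l ih =>
    exact ih _ (mem_addNew_of_mem _ _ _ (mem_addNew_of_mem _ _ _ h))

-- every body occurring in l is collected
theorem mem_collectFrom (l : List (String × String)) (ks : List String) (q : String × String) :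
    q ∈ l → q.1 ∈ l.foldl (fun ks p => addNew (addNew ks p.1) p.2) ks ∧
            q.2 ∈ l.foldl (fun ks p => addNew (addNew ks p.1) p.2) ks := by
  induction l generalizing ks with
  | nil => intro h; cases h
  | cons r l ih =>
    intro h
    rcases List.mem_cons.mp h with h1 | h1
    · subst h1
      simp only [List.foldl_cons]
      exact ⟨mem_collectFrom_of_mem _ _ _ (mem_addNew_of_mem _ _ _ (mem_addNew_self _ _)),
             mem_collectFrom_of_mem _ _ _ (mem_addNew_self _ _)⟩
    · exact ih _ h1

theorem nodup_collectFrom (l : List (String × String)) (ks : List String) (h : ks.Nodup) :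
    (l.foldl (fun ks p => addNew (addNew ks p.1) p.2) ks).Nodup := by
  induction l generalizing ks with
  | nil => exact h
  | cons q l ih => exact ih _ (nodup_addNew _ _ (nodup_addNew _ _ h))

theorem nodup_collectBodies (l : List (String × String)) : (collectBodies l).Nodup :=
  nodup_collectFrom l [] List.nodup_nil

-- a body that is never mentioned is fixed by the backward trace
theorem mindIn_of_not_mem (l : List (String × String)) (b : String) :
    (∀ q ∈ l, b ≠ q.1 ∧ b ≠ q.2) → mindIn l b = b := by
  induction l with
  | nil => exact fun _ => rfl
  | cons q l ih =>
    intro h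
    have hq := h q (by simp)
    have hl : mindIn l b = b := ih (fun r hr => h r (List.mem_cons_of_mem _ hr))
    show (q :: l).reverse.foldl swapBack b = b
    rw [List.reverse_cons, List.foldl_append]
    show swapBack (mindIn l b) q = b
    rw [hl]
    simp [swapBack, hq.1, hq.2]

theorem mindIn_of_not_collected (l : List (String × String)) (b : String)
    (h : b ∉ collectBodies l) : mindIn l b = b := by
  apply mindIn_of_not_mem _ _
  intro q hq
  constructor
  · intro e; exact h (e ▸ (mem_collectFrom l [] q hq).1)
  · intro e; exact h (e ▸ (mem_collectFrom l [] q hq).2)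

theorem mindIn_append_singleton (l : List (String × String)) (p : String × String) (b : String) :
    mindIn (l ++ [p]) b = mindIn l (swapBack b p) := by
  show (l ++ [p]).reverse.foldl swapBack b = _
  rw [List.reverse_append]
  rfl

-- keys of a dict whose items list is a map over K
theorem keys_of_items_map (d : PySem.Dict String String) (K : List String) (f : String → String)
    (hit : d.items = K.map (fun b => (b, f b))) : d.keys = K := by
  simp only [PySem.Dict.keys, hit, List.map_map]
  exact (List.map_congr_left fun x _ => rfl).trans (List.map_id K)

theorem contains_of_items_map (d : PySem.Dict String String) (K : List String) (f : String → String)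
    (hit : d.items = K.map (fun b => (b, f b))) (b : String) :
    d.contains b = decide (b ∈ K) := by
  rw [PySem.Dict.contains_eq_decide_mem_keys, keys_of_items_map d K f hit]

-- guarded identity-insert extends the map form by addNew
theorem extend_items (d : PySem.Dict String String) (K : List String) (f : String → String)
    (b : String) (hit : d.items = K.map (fun x => (x, f x))) (hfb : b ∉ K → f b = b) :
    (if d.contains b then d else d.insert b b).items = (addNew K b).map (fun x => (x, f x)) := by
  by_cases hb : b ∈ K
  · have hc : d.contains b = true := by rw [contains_of_items_map d K f hit]; simp [hb]
    simp [hc, addNew, hb, hit]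
  · have hc : d.contains b = false := by rw [contains_of_items_map d K f hit]; simp [hb]
    simp only [hc]
    rw [if_neg (by simp), PySem.Dict.items_insert_of_not_contains _ _ hc, hit]
    simp [addNew, hb, hfb hb]

theorem getD_of_items_map (d : PySem.Dict String String) (K : List String) (f : String → String)
    (hit : d.items = K.map (fun x => (x, f x))) (hnd : K.Nodup) (b : String) (hb : b ∈ K) :
    d.getD b "" = f b := by
  apply PySem.Dict.getD_of_mem_items
  · rw [hit]; exact List.mem_map_of_mem hb
  · rw [keys_of_items_map d K f hit]; exact hnd

-- the swap part, once both keys are present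
theorem swap_items (d : PySem.Dict String String) (K : List String) (f : String → String)
    (p : String × String) (hit : d.items = K.map (fun x => (x, f x))) (hnd : K.Nodup)
    (h1 : p.1 ∈ K) (h2 : p.2 ∈ K) :
    ((d.insert p.1 (d.getD p.2 "")).insert p.2 (d.getD p.1 "")).items
      = K.map (fun b => (b, f (swapBack b p))) := by
  have v1 : d.getD p.1 "" = f p.1 := getD_of_items_map d K f hit hnd _ h1
  have v2 : d.getD p.2 "" = f p.2 := getD_of_items_map d K f hit hnd _ h2
  have c1 : d.contains p.1 = true := by
    rw [contains_of_items_map d K f hit]; simp [h1]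
  have h3 : (d.insert p.1 (d.getD p.2 "")).items
      = K.map (fun b => (b, if b = p.1 then f p.2 else f b)) := by
    rw [PySem.Dict.items_insert_of_contains _ _ c1, hit, List.map_map]
    apply List.map_congr_left
    intro b _
    by_cases e : b = p.1 <;> simp [e, v2]
  have c2 : (d.insert p.1 (d.getD p.2 "")).contains p.2 = true := by
    rw [contains_of_items_map _ K _ h3]; simp [h2]
  rw [PySem.Dict.items_insert_of_contains _ _ c2, h3, List.map_map]
  apply List.map_congr_left
  intro b _
  by_cases e2 : b = p.2
  · by_cases e1 : b = p.1
    · have hpp : p.2 = p.1 := e2 ▸ e1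
      simp [e2, swapBack, v1, hpp]
    · have hne : ¬ p.2 = p.1 := fun h => e1 (e2.trans h)
      simp [e2, swapBack, v1, hne]
  · by_cases e1 : b = p.1
    · simp [e1, swapBack, v1]
      exact fun hh => absurd (e1.trans hh) e2
    · simp [e1, e2, swapBack, v1]

-- one stepA preserves the "items are a map over the collected keys" shape
theorem stepA_items (d : PySem.Dict String String) (K : List String) (f : String → String)
    (p : String × String) (hit : d.items = K.map (fun b => (b, f b))) (hnd : K.Nodup)
    (h1 : p.1 ∉ K → f p.1 = p.1) (h2 : p.2 ∉ K → f p.2 = p.2) :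
    (stepA d p).items = (addNew (addNew K p.1) p.2).map (fun b => (b, f (swapBack b p))) := by
  unfold stepA
  have hit1 : (if d.contains p.1 then d else d.insert p.1 p.1).items
      = (addNew K p.1).map (fun x => (x, f x)) := extend_items d K f p.1 hit h1
  have hnd1 : (addNew K p.1).Nodup := nodup_addNew _ _ hnd
  have h2' : p.2 ∉ addNew K p.1 → f p.2 = p.2 := by
    intro h; exact h2 (fun hm => h (mem_addNew_of_mem _ _ _ hm))
  have hit2 := extend_items _ (addNew K p.1) f p.2 hit1 h2'
  exact swap_items _ (addNew (addNew K p.1) p.2) f p hit2 (nodup_addNew _ _ hnd1)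
    (mem_addNew_of_mem _ _ _ (mem_addNew_self _ _)) (mem_addNew_self _ _)

-- main invariant: A's fold has exactly B's items
theorem foldA_items (l : List (String × String)) :
    (l.foldl stepA PySem.Dict.empty).items
      = (collectBodies l).map (fun b => (b, mindIn l b)) := by
  induction l using List.reverseRecOn with
  | nil => rfl
  | append_singleton l p ih =>
    rw [List.foldl_append, List.foldl_cons, List.foldl_nil]
    have hcb : collectBodies (l ++ [p])
        = addNew (addNew (collectBodies l) p.1) p.2 := by
      unfold collectBodies
      rw [List.foldl_append, List.foldl_cons, List.foldl_nil]
    rw [stepA_items _ (collectBodies l) (mindIn l) p ih (nodup_collectBodies l)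
        (fun h => mindIn_of_not_collected l p.1 h)
        (fun h => mindIn_of_not_collected l p.2 h), hcb]
    apply List.map_congr_left
    intro b _
    rw [mindIn_append_singleton]

-- ===== VERDICT (by name: the statement is the Claim_ definition above) =====
theorem getBodyToMind_spec : Claim_equal_getBodyToMind := by
  intro journal _
  show getBodyToMind journal = getBodyToMind_alt journal
  unfold getBodyToMind getBodyToMind_alt
  exact foldA_items journal
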